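-- pv_equiv track=rewrite | github.com/rehenmanoy/improving | greedy1.py | getUniqueCount
-- ===== SOURCE A (Python) =====
-- def getUniqueCount(arr):
--     arr.sort()
--     used = set()
--
--     for x in arr:
--         if x-1 > 0 and (x-1) not in used:
--             used.add( x-1)
--         elif x not in used:
--             used.add(x)
--         elif x+1 not in used:
--             used.add(x+1)
--
--     return len(used)
-- ===== SOURCE B (Python) =====
-- def getUniqueCount(arr):
--     arr.sort()
--     # run-length encode the sorted array: [(value, multiplicity)] in increasing order
--     runs = []
--     for x in arr:
--         if runs and runs[-1][0] == x:
--             runs[-1] = (x, runs[-1][1] + 1)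
--         else:
--             runs.append((x, 1))
--     prev = None  # largest value assigned so far
--     total = 0
--     for v, k in runs:
--         # candidate slots still free for value v, in A's preference order
--         slots = [c for c in (v - 1, v, v + 1)
--                  if (c != v - 1 or c > 0) and (prev is None or c > prev)]
--         taken = slots[:k]
--         total += len(taken)
--         if taken:
--             prev = taken[-1]
--     return total
-- ===== Notes on version B (the rewrite author's own statement) =====
-- stated objective: alternative
-- what changed: B run-length-encodes the sorted array and, per distinct value v with multiplicity k, takes the first k entries of the filtered candidate-slot list [v-1, v, v+1] at once (filtered by the positivity guard and by being above the last assigned value), replacing A's per-element three-way set-membership branch chain and the set itself.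
import Mathlib
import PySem

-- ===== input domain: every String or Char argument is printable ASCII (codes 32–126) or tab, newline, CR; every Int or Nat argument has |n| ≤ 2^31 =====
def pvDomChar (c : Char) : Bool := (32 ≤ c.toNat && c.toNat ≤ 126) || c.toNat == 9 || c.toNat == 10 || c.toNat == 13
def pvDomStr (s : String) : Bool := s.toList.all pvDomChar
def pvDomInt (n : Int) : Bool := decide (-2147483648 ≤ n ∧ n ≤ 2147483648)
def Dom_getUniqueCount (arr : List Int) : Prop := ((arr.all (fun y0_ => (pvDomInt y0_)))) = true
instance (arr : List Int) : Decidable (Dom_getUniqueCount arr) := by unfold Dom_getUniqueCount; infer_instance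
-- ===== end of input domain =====

-- B run-length-encodes the sorted array and, per distinct value, slices the filtered
-- candidate-slot list [v-1, v, v+1] by the multiplicity, replacing A's per-element
-- set-membership branch chain; equivalence is about the RETURN value only (both
-- Pythons sort `arr` in place identically).

-- ===== PORT A =====
-- loop body of A: the three-way elif chain over the set `used`
def pvStepA (used : PySem.Set Int) (x : Int) : PySem.Set Int :=
  if x - 1 > 0 ∧ ¬ ((x - 1) ∈ used) then PySem.Set.add used (x - 1)
  else if ¬ (x ∈ used) then PySem.Set.add used x
  else if ¬ ((x + 1) ∈ used) then PySem.Set.add used (x + 1)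
  else used

def getUniqueCount (arr : List Int) : Int :=
  let sortedArr := PySem.List.sorted arr (fun x => x) false   -- arr.sort()
  let used := sortedArr.foldl pvStepA (PySem.Set.empty)
  (used.length : Int)                                          -- len(used)

-- ===== PORT B =====
-- `prev is None or c > prev`
def pvGtPrev (prev : Option Int) (c : Int) : Bool :=
  match prev with
  | none => true
  | some p => decide (c > p)

-- the comprehension: [c for c in (v-1, v, v+1) if (c != v-1 or c > 0) and (prev is None or c > prev)]
def pvSlots (prev : Option Int) (v : Int) : List Int :=
  [v - 1, v, v + 1].filter (fun c => (c != v - 1 || decide (c > 0)) && pvGtPrev prev c)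

-- run-length pass: extend the last run or start a new one
def pvRLEStep (runs : List (Int × Int)) (x : Int) : List (Int × Int) :=
  match runs.getLast? with
  | some g => if g.1 == x then runs.dropLast ++ [(x, g.2 + 1)] else runs ++ [(x, 1)]
  | none => [(x, 1)]

-- per-run body: state is (prev, total); g = (v, k)
def pvGroupStep (st : Option Int × Int) (g : Int × Int) : Option Int × Int :=
  let slots := pvSlots st.1 g.1
  let taken := PySem.List.slice slots none (some g.2)      -- slots[:k]
  let total := st.2 + PySem.List.len taken                 -- total += len(taken)
  match PySem.List.pyGet? taken (-1) with                  -- if taken: prev = taken[-1]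
  | some c => (some c, total)
  | none => (st.1, total)

def getUniqueCount_alt (arr : List Int) : Int :=
  let sortedArr := PySem.List.sorted arr (fun x => x) false   -- arr.sort()
  let runs := sortedArr.foldl pvRLEStep []
  (runs.foldl pvGroupStep (none, 0)).2

-- ===== PRECONDITION & SPEC =====
def Spec_getUniqueCount (arr : List Int) (out : Int) : Prop := out = getUniqueCount_alt arr
instance (arr : List Int) (out : Int) : Decidable (Spec_getUniqueCount arr out) := by unfold Spec_getUniqueCount; infer_instance

-- ===== CLAIM (what is proved, stated in full; the proofs are below) =====
def Claim_equal_getUniqueCount : Prop := ∀ (arr : List Int), Dom_getUniqueCount arr → Spec_getUniqueCount arr (getUniqueCount arr)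

-- ===== LEMMAS AND PROOFS =====

-- proof-side per-element loop with state (prev, count): the intermediary between A and B
def pvStepB (st : Option Int × Int) (x : Int) : Option Int × Int :=
  if x - 1 > 0 ∧ pvGtPrev st.1 (x - 1) = true then (some (x - 1), st.2 + 1)
  else if pvGtPrev st.1 x = true then (some x, st.2 + 1)
  else if pvGtPrev st.1 (x + 1) = true then (some (x + 1), st.2 + 1)
  else st

-- the candidates a future element y ≥ lb can still query: c ≥ lb-1, and c = lb-1 only behind the `x-1 > 0` guard
def pvValid (lb : Option Int) (c : Int) : Prop :=
  match lb with
  | none => True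
  | some y => y - 1 ≤ c ∧ (0 < c ∨ y ≤ c)

theorem pvGtPrev_iff (prev : Option Int) (c : Int) :
    pvGtPrev prev c = true ↔ ¬ (∃ p, prev = some p ∧ c ≤ p) := by
  cases prev with
  | none => simp [pvGtPrev]
  | some p => simp [pvGtPrev]

theorem pvGtPrev_mono (prev : Option Int) (c c' : Int) (h : pvGtPrev prev c = true) (hle : c ≤ c') :
    pvGtPrev prev c' = true := by
  cases prev with
  | none => rfl
  | some p => simp only [pvGtPrev, decide_eq_true_iff] at h ⊢; omega

-- STEP 1: A's set loop = the per-element (prev, count) loop, on a sorted list.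
-- coupled loop invariant: `used` holds exactly the valid candidates ≤ prev, and count = |used|
theorem pvLoop_eq (l : List Int) :
    ∀ (used : PySem.Set Int) (prev : Option Int) (count : Int) (lb : Option Int),
    l.Pairwise (· ≤ ·) →
    (∀ x ∈ l, ∀ y, lb = some y → y ≤ x) →
    count = (used.length : Int) →
    (∀ c, pvValid lb c → (c ∈ used ↔ ∃ p, prev = some p ∧ c ≤ p)) →
    ((l.foldl pvStepA used).length : Int) = (l.foldl pvStepB (prev, count)).2 := by
  induction l with
  | nil => intro used prev count lb _ _ hc _; simpa using hc.symm
  | cons x t ih =>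
    intro used prev count lb hpw hlb hc hinv
    have hpw' : t.Pairwise (· ≤ ·) := hpw.of_cons
    have hxt : ∀ z ∈ t, x ≤ z := fun z hz => List.rel_of_pairwise_cons hpw hz
    have hxlb : ∀ y, lb = some y → y ≤ x := hlb x (List.mem_cons_self ..)
    have hlb' : ∀ z ∈ t, ∀ y, (some x : Option Int) = some y → y ≤ z := by
      intro z hz y hy; cases hy; exact hxt z hz
    have hvx : pvValid lb x := by
      cases lb with
      | none => trivial
      | some y => exact ⟨by have := hxlb y rfl; omega, Or.inr (hxlb y rfl)⟩
    have hvx1 : pvValid lb (x + 1) := by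
      cases lb with
      | none => trivial
      | some y => exact ⟨by have := hxlb y rfl; omega, Or.inr (by have := hxlb y rfl; omega)⟩
    have hvm : 0 < x - 1 → pvValid lb (x - 1) := by
      intro h
      cases lb with
      | none => trivial
      | some y => exact ⟨by have := hxlb y rfl; omega, Or.inl h⟩
    have hvalid_mono : ∀ c, pvValid (some x) c → pvValid lb c := by
      intro c hcv
      cases lb with
      | none => trivial
      | some y =>
        have hy := hxlb y rfl
        obtain ⟨h1, h2⟩ := hcv
        exact ⟨by omega, by omega⟩
    simp only [List.foldl_cons]
    by_cases hP1 : x - 1 > 0 ∧ ¬ (∃ p, prev = some p ∧ x - 1 ≤ p)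
    · -- branch 1: assign x-1
      have hnm : (x - 1) ∉ used := fun h => hP1.2 ((hinv _ (hvm hP1.1)).1 h)
      have hA : pvStepA used x = used ++ [x - 1] := by
        rw [pvStepA, if_pos ⟨hP1.1, hnm⟩, PySem.Set.add_of_not_mem hnm]
      have hB : pvStepB (prev, count) x = (some (x - 1), count + 1) := by
        rw [pvStepB, if_pos ⟨hP1.1, (pvGtPrev_iff prev (x - 1)).2 hP1.2⟩]
      rw [hA, hB]
      apply ih (used ++ [x - 1]) (some (x - 1)) (count + 1) (some x) hpw' hlb'
      · simp [hc]
      · intro c ⟨h1, h2⟩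
        simp only [List.mem_append, List.mem_singleton, Option.some.injEq,
          exists_eq_left']
        constructor
        · rintro (hcu | rfl)
          · obtain ⟨p, hp, hcp⟩ := (hinv c (hvalid_mono c ⟨h1, h2⟩)).1 hcu
            have : ¬ (x - 1 ≤ p) := fun h => hP1.2 ⟨p, hp, h⟩
            omega
          · omega
        · intro hle; right; omega
    · -- branch 1 not taken: in A, either guard fails or x-1 ∈ used
      have hnA1 : ¬ (x - 1 > 0 ∧ (x - 1) ∉ used) := by
        intro ⟨hg, hn⟩
        exact hn ((hinv _ (hvm hg)).2 (by push Not at hP1; exact hP1 hg))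
      have hnB1 : ¬ (x - 1 > 0 ∧ pvGtPrev prev (x - 1) = true) := by
        intro ⟨hg, hgt⟩
        exact hP1 ⟨hg, (pvGtPrev_iff prev (x - 1)).1 hgt⟩
      by_cases hP2 : ¬ (∃ p, prev = some p ∧ x ≤ p)
      · -- branch 2: assign x
        have hnm : x ∉ used := fun h => hP2 ((hinv x hvx).1 h)
        have hA : pvStepA used x = used ++ [x] := by
          rw [pvStepA, if_neg hnA1, if_pos hnm, PySem.Set.add_of_not_mem hnm]
        have hB : pvStepB (prev, count) x = (some x, count + 1) := by
          rw [pvStepB, if_neg hnB1, if_pos ((pvGtPrev_iff prev x).2 hP2)]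
        rw [hA, hB]
        apply ih (used ++ [x]) (some x) (count + 1) (some x) hpw' hlb'
        · simp [hc]
        · intro c ⟨h1, h2⟩
          simp only [List.mem_append, List.mem_singleton, Option.some.injEq,
            exists_eq_left']
          constructor
          · rintro (hcu | rfl)
            · obtain ⟨p, hp, hcp⟩ := (hinv c (hvalid_mono c ⟨h1, h2⟩)).1 hcu
              have : ¬ (x ≤ p) := fun h => hP2 ⟨p, hp, h⟩
              omega
            · omega
          · intro hle
            by_cases hcx : c = x
            · right; exact hcx
            · -- c = x - 1, and then 0 < x - 1 so branch-1 failure put x-1 in used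
              have hc1 : c = x - 1 := by omega
              have hg : 0 < x - 1 := by omega
              left
              have := (hinv _ (hvm hg)).2 (by push Not at hP1; exact hP1 hg)
              rwa [← hc1] at this
      · push Not at hP2
        have hxm : x ∈ used := (hinv x hvx).2 hP2
        have hnB2 : ¬ (pvGtPrev prev x = true) := fun h => (pvGtPrev_iff prev x).1 h hP2
        by_cases hP3 : ¬ (∃ p, prev = some p ∧ x + 1 ≤ p)
        · -- branch 3: assign x+1
          have hnm : (x + 1) ∉ used := fun h => hP3 ((hinv _ hvx1).1 h)
          have hA : pvStepA used x = used ++ [x + 1] := by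
            rw [pvStepA, if_neg hnA1, if_neg (by simpa using hxm), if_pos hnm,
              PySem.Set.add_of_not_mem hnm]
          have hB : pvStepB (prev, count) x = (some (x + 1), count + 1) := by
            rw [pvStepB, if_neg hnB1, if_neg hnB2, if_pos ((pvGtPrev_iff prev (x + 1)).2 hP3)]
          rw [hA, hB]
          apply ih (used ++ [x + 1]) (some (x + 1)) (count + 1) (some x) hpw' hlb'
          · simp [hc]
          · intro c ⟨h1, h2⟩
            simp only [List.mem_append, List.mem_singleton, Option.some.injEq,
              exists_eq_left']
            constructor
            · rintro (hcu | rfl)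
              · obtain ⟨p, hp, hcp⟩ := (hinv c (hvalid_mono c ⟨h1, h2⟩)).1 hcu
                have : ¬ (x + 1 ≤ p) := fun h => hP3 ⟨p, hp, h⟩
                omega
              · omega
            · intro hle
              by_cases hcx1 : c = x + 1
              · right; exact hcx1
              · left
                by_cases hcx : c = x
                · rwa [hcx]
                · have hc1 : c = x - 1 := by omega
                  have hg : 0 < x - 1 := by omega
                  have := (hinv _ (hvm hg)).2 (by push Not at hP1; exact hP1 hg)
                  rwa [← hc1] at this
        · -- branch 4: skip
          push Not at hP3
          have hx1m : (x + 1) ∈ used := (hinv _ hvx1).2 hP3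
          have hA : pvStepA used x = used := by
            rw [pvStepA, if_neg hnA1, if_neg (by simpa using hxm), if_neg (by simpa using hx1m)]
          have hB : pvStepB (prev, count) x = (prev, count) := by
            rw [pvStepB, if_neg hnB1, if_neg hnB2,
              if_neg (fun h => (pvGtPrev_iff prev (x + 1)).1 h hP3)]
          rw [hA, hB]
          exact ih used prev count (some x) hpw' hlb' hc
            (fun c hcv => hinv c (hvalid_mono c hcv))

-- STEP 2: the per-element loop = B's run-length loop (on ANY list: runs group adjacent equals).
theorem pvSlots_eq (prev : Option Int) (v : Int) :
    pvSlots prev v =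
      (if 0 < v - 1 ∧ pvGtPrev prev (v - 1) = true then [v - 1] else []) ++
      (if pvGtPrev prev v = true then [v] else []) ++
      (if pvGtPrev prev (v + 1) = true then [v + 1] else []) := by
  have h1 : ((v - 1 : Int) != v - 1) = false := by simp
  have h2 : ((v : Int) != v - 1) = true := by simp only [bne_iff_ne, ne_eq]; omega
  have h3 : ((v + 1 : Int) != v - 1) = true := by simp only [bne_iff_ne, ne_eq]; omega
  cases prev with
  | none =>
    simp only [pvSlots, pvGtPrev, List.filter_cons, List.filter_nil, h1, h2, h3,
      Bool.false_or, Bool.true_or, Bool.true_and, Bool.and_true]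
    split_ifs with a b c d e f g <;> simp_all <;> omega
  | some p =>
    simp only [pvSlots, pvGtPrev, List.filter_cons, List.filter_nil, h1, h2, h3,
      Bool.false_or, Bool.true_or, Bool.true_and]
    split_ifs with a b c d e f g <;> simp_all <;> omega

theorem pvStepB_slots (prev : Option Int) (cnt v : Int) :
    pvStepB (prev, cnt) v = match pvSlots prev v with
      | [] => (prev, cnt)
      | h :: _ => (some h, cnt + 1) := by
  rw [pvSlots_eq]
  by_cases p1 : 0 < v - 1 ∧ pvGtPrev prev (v - 1) = true
  · rw [pvStepB, if_pos (by exact ⟨p1.1, p1.2⟩), if_pos p1]; simp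
  · rw [if_neg p1]
    by_cases p2 : pvGtPrev prev v = true
    · rw [pvStepB, if_neg (by exact fun h => p1 ⟨h.1, h.2⟩), if_pos p2, if_pos p2]; simp
    · rw [if_neg p2]
      by_cases p3 : pvGtPrev prev (v + 1) = true
      · rw [pvStepB, if_neg (by exact fun h => p1 ⟨h.1, h.2⟩), if_neg p2, if_pos p3, if_pos p3]
        simp
      · rw [pvStepB, if_neg (by exact fun h => p1 ⟨h.1, h.2⟩), if_neg p2, if_neg p3, if_neg p3]
        simp

theorem pvSlots_tail (prev : Option Int) (v h : Int) (S' : List Int)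
    (heq : pvSlots prev v = h :: S') : pvSlots (some h) v = S' := by
  rw [pvSlots_eq] at heq
  by_cases p1 : 0 < v - 1 ∧ pvGtPrev prev (v - 1) = true
  · rw [if_pos p1] at heq
    have hm2 : pvGtPrev prev v = true := pvGtPrev_mono prev (v - 1) v p1.2 (by omega)
    have hm3 : pvGtPrev prev (v + 1) = true := pvGtPrev_mono prev (v - 1) (v + 1) p1.2 (by omega)
    rw [if_pos hm2, if_pos hm3] at heq
    simp only [List.cons_append, List.nil_append, List.cons.injEq] at heq
    obtain ⟨rfl, rfl⟩ := heq
    rw [pvSlots_eq,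
      if_neg (by simp only [pvGtPrev, decide_eq_true_iff]; omega),
      if_pos (by simp only [pvGtPrev, decide_eq_true_iff]; omega),
      if_pos (by simp only [pvGtPrev, decide_eq_true_iff]; omega)]
    simp
  · rw [if_neg p1] at heq
    by_cases p2 : pvGtPrev prev v = true
    · rw [if_pos p2] at heq
      have hm3 : pvGtPrev prev (v + 1) = true := pvGtPrev_mono prev v (v + 1) p2 (by omega)
      rw [if_pos hm3] at heq
      simp only [List.nil_append, List.cons_append, List.cons.injEq] at heq
      obtain ⟨rfl, rfl⟩ := heq
      rw [pvSlots_eq,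
        if_neg (by rintro ⟨-, hg⟩; simp only [pvGtPrev, decide_eq_true_iff] at hg; omega),
        if_neg (by simp only [pvGtPrev, decide_eq_true_iff]; omega),
        if_pos (by simp only [pvGtPrev, decide_eq_true_iff]; omega)]
      simp
    · rw [if_neg p2] at heq
      by_cases p3 : pvGtPrev prev (v + 1) = true
      · rw [if_pos p3] at heq
        simp only [List.nil_append, List.cons.injEq] at heq
        obtain ⟨rfl, rfl⟩ := heq
        rw [pvSlots_eq,
          if_neg (by rintro ⟨-, hg⟩; simp only [pvGtPrev, decide_eq_true_iff] at hg; omega),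
          if_neg (by simp only [pvGtPrev, decide_eq_true_iff]; omega),
          if_neg (by simp only [pvGtPrev, decide_eq_true_iff]; omega)]
        simp
      · rw [if_neg p3] at heq; simp at heq

theorem pvGroup_eq (k : Nat) : ∀ (prev : Option Int) (cnt v : Int),
    List.foldl pvStepB (prev, cnt) (List.replicate k v) = pvGroupStep (prev, cnt) (v, (k : Int)) := by
  induction k with
  | zero =>
    intro prev cnt v
    rw [pvGroupStep]
    dsimp only
    rw [PySem.List.slice_to_natCast]
    simp [PySem.List.len_eq, PySem.List.pyGet?_neg_one]
  | succ k ih =>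
    intro prev cnt v
    rw [List.replicate_succ, List.foldl_cons, pvStepB_slots]
    cases hS : pvSlots prev v with
    | nil =>
      rw [ih]
      rw [pvGroupStep, pvGroupStep]
      dsimp only
      rw [hS, PySem.List.slice_to_natCast, PySem.List.slice_to_natCast]
      simp
    | cons h S' =>
      rw [ih (some h) (cnt + 1) v]
      have hS' : pvSlots (some h) v = S' := pvSlots_tail prev v h S' hS
      rw [pvGroupStep, pvGroupStep]
      dsimp only
      rw [hS, hS', PySem.List.slice_to_natCast, PySem.List.slice_to_natCast,
        List.take_succ_cons]
      simp only [PySem.List.len_eq, PySem.List.pyGet?_neg_one]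
      cases htk : (S'.take k).getLast? with
      | none =>
        have hemp : S'.take k = [] := by
          cases hkk : S'.take k with
          | nil => rfl
          | cons a b => rw [hkk] at htk; simp at htk
        simp [hemp, List.getLast?_cons]
      | some c =>
        rw [show ((h :: S'.take k).getLast? = some c) by simp [List.getLast?_cons, htk]]
        simp only [List.length_cons, Prod.mk.injEq, true_and]
        push_cast
        ring


def pvRLE (v : Int) (k : Int) : List Int → List (Int × Int)
  | [] => [(v, k)]
  | x :: t => if x = v then pvRLE v (k + 1) t else (v, k) :: pvRLE x 1 t

theorem pvRLEStep_foldl (l : List Int) : ∀ (gs : List (Int × Int)) (v k : Int),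
    l.foldl pvRLEStep (gs ++ [(v, k)]) = gs ++ pvRLE v k l := by
  induction l with
  | nil => intro gs v k; simp [pvRLE]
  | cons x t ih =>
    intro gs v k
    rw [List.foldl_cons]
    by_cases hx : x = v
    · have hstep : pvRLEStep (gs ++ [(v, k)]) x = gs ++ [(v, k + 1)] := by
        simp [pvRLEStep, List.getLast?_concat, hx, List.dropLast_concat]
      rw [hstep, ih gs v (k + 1), pvRLE, if_pos hx]
    · have hvx : ((v : Int) == x) = false := by simp; omega
      have hstep : pvRLEStep (gs ++ [(v, k)]) x = (gs ++ [(v, k)]) ++ [(x, 1)] := by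
        simp [pvRLEStep, List.getLast?_concat, hvx]
      rw [hstep, ih (gs ++ [(v, k)]) x 1, pvRLE, if_neg hx]
      simp

theorem pvRuns_eq (l : List Int) : ∀ (v : Int) (k : Nat) (st : Option Int × Int),
    List.foldl pvStepB st (List.replicate k v ++ l) = (pvRLE v (k : Int) l).foldl pvGroupStep st := by
  induction l with
  | nil =>
    intro v k st
    rw [pvRLE, List.append_nil]
    obtain ⟨prev, cnt⟩ := st
    rw [pvGroup_eq k prev cnt v]
    simp [pvGroupStep]
  | cons x t ih =>
    intro v k st
    by_cases hx : x = v
    · subst hx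
      have hrep : List.replicate k x ++ x :: t = List.replicate (k + 1) x ++ t := by
        rw [List.replicate_succ']
        simp
      rw [hrep, ih x (k + 1) st, pvRLE, if_pos rfl]
      push_cast
      ring_nf
    · rw [pvRLE, if_neg hx]
      obtain ⟨prev, cnt⟩ := st
      have hsplit : List.replicate k v ++ x :: t = (List.replicate k v) ++ ([x] ++ t) := by simp
      rw [hsplit, List.foldl_append, pvGroup_eq k prev cnt v, List.singleton_append,
        List.foldl_cons, List.foldl_cons]
      have := ih x 1 (pvGroupStep (prev, cnt) (v, (k : Int)))
      simp only [Nat.cast_one, List.replicate_one, List.singleton_append, List.foldl_cons] at this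
      exact this

theorem pvBridge (l : List Int) :
    (l.foldl pvStepB (none, 0)) = ((l.foldl pvRLEStep []).foldl pvGroupStep (none, 0)) := by
  cases l with
  | nil => rfl
  | cons v t =>
    rw [List.foldl_cons (f := pvRLEStep)]
    have hstep : pvRLEStep [] v = [] ++ [(v, 1)] := by simp [pvRLEStep]
    rw [hstep, pvRLEStep_foldl t [] v 1, List.nil_append]
    have := pvRuns_eq t v 1 (none, 0)
    simpa using this

-- ===== VERDICT (by name: the statement is the Claim_ definition above) =====
theorem getUniqueCount_spec : Claim_equal_getUniqueCount := by
  unfold Claim_equal_getUniqueCount Spec_getUniqueCount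
  intro arr _
  show ((List.foldl pvStepA PySem.Set.empty (PySem.List.sorted arr (fun x => x) false)).length : Int)
      = (List.foldl pvGroupStep (none, 0) (List.foldl pvRLEStep [] (PySem.List.sorted arr (fun x => x) false))).2
  rw [← pvBridge]
  exact pvLoop_eq _ PySem.Set.empty none 0 none
    (by simpa using PySem.List.sorted_pairwise (xs := arr) (key := fun x => x))
    (by intro x _ y h; cases h) (by simp [PySem.Set.empty]) (by simp [PySem.Set.empty])
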